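-- pv_equiv track=rewrite | github.com/billrollins/EcoThrift | apps/home/html_elements.py | form_content_html
-- ===== SOURCE A (Python) =====
-- def form_content_html(fields):
--     field_html, s = '', 0
--     for _s, _l, _f in fields:
--         s += _s
--         if s > 12:
--             field_html += '</div>\n<div class="row mt-3">'
--             s -= 12
--         field_html += f'<div class="col-{_s}"><label>{_l}</label>{_f}</div>'
--     return f'<div class="row mt-3">{field_html}</div>'
-- ===== SOURCE B (Python) =====
-- def form_content_html(fields):
--     def rows(fs, s):
--         # returns (content of the current row, list of the remaining rows' contents)
--         if not fs:
--             return '', []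
--         (_s, _l, _f), rest = fs[0], fs[1:]
--         frag = f'<div class="col-{_s}"><label>{_l}</label>{_f}</div>'
--         if s + _s > 12:
--             head, tail = rows(rest, s + _s - 12)
--             return '', [frag + head] + tail
--         head, tail = rows(rest, s + _s)
--         return frag + head, tail
--     head, tail = rows(fields, 0)
--     return '\n'.join(f'<div class="row mt-3">{r}</div>' for r in [head] + tail)
-- ===== Notes on version B (the rewrite author's own statement) =====
-- stated objective: alternative
-- what changed: B replaces A's fold over a flat accumulator string with inline row-break markers by a structural recursion that returns the row contents back-to-front as (head row, remaining rows) and then renders and newline-joins the wrapped rows.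
import Mathlib
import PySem

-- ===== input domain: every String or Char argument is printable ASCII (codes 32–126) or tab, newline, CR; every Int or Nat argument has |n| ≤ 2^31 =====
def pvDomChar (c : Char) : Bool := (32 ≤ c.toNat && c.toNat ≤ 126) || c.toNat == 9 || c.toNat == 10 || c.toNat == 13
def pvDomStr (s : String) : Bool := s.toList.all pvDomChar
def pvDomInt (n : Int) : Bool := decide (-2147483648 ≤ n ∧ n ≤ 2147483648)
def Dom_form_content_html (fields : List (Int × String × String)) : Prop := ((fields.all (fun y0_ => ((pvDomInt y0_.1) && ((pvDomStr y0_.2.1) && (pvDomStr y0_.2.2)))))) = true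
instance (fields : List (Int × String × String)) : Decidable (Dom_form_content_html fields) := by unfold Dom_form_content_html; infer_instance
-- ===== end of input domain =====

-- B replaces A's fold over a flat accumulator string with inline row-break markers by a
-- structural recursion returning the row contents as (head row, remaining rows), which are
-- then wrapped and newline-joined; objective: alternative decomposition (same O(n) cost).

-- ===== PORT A =====
-- loop body of A's for-loop (state: (field_html, s))
def form_content_html_step (acc : String × Int) (fld : Int × String × String) : String × Int :=
  let s := acc.2 + fld.1
  let fhs : String × Int :=
    if s > 12 then (acc.1 ++ "</div>\n<div class=\"row mt-3\">", s - 12) else (acc.1, s)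
  (fhs.1 ++ "<div class=\"col-" ++ PySem.Int.toStr fld.1 ++ "\"><label>" ++ fld.2.1 ++ "</label>" ++ fld.2.2 ++ "</div>", fhs.2)

def form_content_html (fields : List (Int × String × String)) : String :=
  let r := fields.foldl form_content_html_step ("", 0)
  "<div class=\"row mt-3\">" ++ r.1 ++ "</div>"

-- ===== PORT B =====
-- B's inner recursive helper 'rows': (current row content, remaining rows' contents)
def form_content_html_alt_rows : List (Int × String × String) → Int → String × List String
  | [], _ => ("", [])
  | (sz, l, f) :: rest, s =>
    let frag := "<div class=\"col-" ++ PySem.Int.toStr sz ++ "\"><label>" ++ l ++ "</label>" ++ f ++ "</div>"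
    if s + sz > 12 then
      let ht := form_content_html_alt_rows rest (s + sz - 12)
      ("", (frag ++ ht.1) :: ht.2)
    else
      let ht := form_content_html_alt_rows rest (s + sz)
      (frag ++ ht.1, ht.2)

def form_content_html_alt (fields : List (Int × String × String)) : String :=
  let ht := form_content_html_alt_rows fields 0
  PySem.Str.join "\n" ((ht.1 :: ht.2).map (fun r => "<div class=\"row mt-3\">" ++ r ++ "</div>"))

-- ===== PRECONDITION & SPEC =====
def Spec_form_content_html (fields : List (Int × String × String)) (out : String) : Prop := out = form_content_html_alt fields
instance (fields : List (Int × String × String)) (out : String) : Decidable (Spec_form_content_html fields out) := by unfold Spec_form_content_html; infer_instance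

-- ===== CLAIM (what is proved, stated in full; the proofs are below) =====
def Claim_equal_form_content_html : Prop := ∀ (fields : List (Int × String × String)), Dom_form_content_html fields → Spec_form_content_html fields (form_content_html fields)

-- ===== LEMMAS AND PROOFS =====

-- '\n'.join
def pvCatNl : List String → String
  | [] => ""
  | [x] => x
  | x :: y :: l => x ++ "\n" ++ pvCatNl (y :: l)

lemma pvStr_ext {a b : String} (h : a.toList = b.toList) : a = b := String.toList_inj.mp h

lemma pvJoin_nl (l : List String) : PySem.Str.join "\n" l = pvCatNl l := by
  induction l with
  | nil => apply pvStr_ext; simp [PySem.Str.join, PySem.Chars.join, List.intercalate, pvCatNl]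
  | cons x l ih =>
    cases l with
    | nil =>
      apply pvStr_ext
      simp [PySem.Str.join, PySem.Chars.join, List.intercalate, pvCatNl]
    | cons y t =>
      apply pvStr_ext
      have ih' := congrArg String.toList ih
      simp [PySem.Str.join, PySem.Chars.join] at ih' ⊢
      rw [show List.intercalate ['\n'] (x.toList :: y.toList :: t.map String.toList)
            = x.toList ++ ['\n'] ++ List.intercalate ['\n'] (y.toList :: t.map String.toList) by
          simp [List.intercalate, List.intersperse]]
      rw [ih']
      simp [pvCatNl, List.append_assoc]

-- A's flat body string corresponding to rows (h, t)
def pvFlat : String × List String → String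
  | (h, t) => h ++ (t.map (fun r => "</div>\n<div class=\"row mt-3\">" ++ r)).foldr (· ++ ·) ""

lemma pvFlat_cons (h r : String) (rs : List String) :
    pvFlat (h, r :: rs) = h ++ "</div>\n<div class=\"row mt-3\">" ++ pvFlat (r, rs) := by
  simp [pvFlat, String.append_assoc]

lemma pvLoop_eq (fields : List (Int × String × String)) :
    ∀ (acc : String) (s : Int),
      (List.foldl form_content_html_step (acc, s) fields).1 =
        acc ++ pvFlat (form_content_html_alt_rows fields s) := by
  induction fields with
  | nil => intro acc s; simp [pvFlat, form_content_html_alt_rows]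
  | cons fld tl ih =>
    intro acc s
    obtain ⟨sz, l, f⟩ := fld
    simp only [List.foldl_cons]
    by_cases h : s + sz > 12
    · have hA : form_content_html_step (acc, s) (sz, l, f) =
          (acc ++ "</div>\n<div class=\"row mt-3\">" ++ ("<div class=\"col-" ++ PySem.Int.toStr sz ++
            "\"><label>" ++ l ++ "</label>" ++ f ++ "</div>"), s + sz - 12) := by
        simp [form_content_html_step, h, String.append_assoc]
        conv_rhs => rw [← String.append_assoc]
        simp
      rw [hA, ih]
      simp only [form_content_html_alt_rows, h, if_pos]
      rw [pvFlat_cons]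
      simp [pvFlat, String.append_assoc]
    · have hA : form_content_html_step (acc, s) (sz, l, f) =
          (acc ++ ("<div class=\"col-" ++ PySem.Int.toStr sz ++
            "\"><label>" ++ l ++ "</label>" ++ f ++ "</div>"), s + sz) := by
        simp [form_content_html_step, h, String.append_assoc]
      rw [hA, ih]
      simp only [form_content_html_alt_rows, h, if_neg, not_false_iff]
      simp [pvFlat, String.append_assoc]

lemma pvSep_split : "</div>\n<div class=\"row mt-3\">" =
    "</div>" ++ "\n" ++ "<div class=\"row mt-3\">" := by simp

lemma pvCatNl_cons_ne' (x : String) (l : List String) (h : l ≠ []) :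
    pvCatNl (x :: l) = x ++ "\n" ++ pvCatNl l := by
  cases l with
  | nil => exact absurd rfl h
  | cons y t => rfl

lemma pvRender (t : List String) : ∀ (h : String),
    "<div class=\"row mt-3\">" ++ pvFlat (h, t) ++ "</div>" =
      pvCatNl ((h :: t).map (fun r => "<div class=\"row mt-3\">" ++ r ++ "</div>")) := by
  induction t with
  | nil => intro h; simp [pvFlat, pvCatNl]
  | cons r rs ih =>
    intro h
    rw [pvFlat_cons, List.map_cons, pvCatNl_cons_ne' _ _ (by simp), ← ih r]
    simp only [pvSep_split]
    simp [String.append_assoc]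
    conv_rhs => rw [← String.append_assoc]
    simp

-- ===== VERDICT (by name: the statement is the Claim_ definition above) =====
theorem form_content_html_spec : Claim_equal_form_content_html := by
  intro fields _
  unfold Spec_form_content_html form_content_html form_content_html_alt
  simp only
  rw [pvJoin_nl]
  have h1 := pvLoop_eq fields "" 0
  rw [show ("" ++ pvFlat (form_content_html_alt_rows fields 0)) = pvFlat (form_content_html_alt_rows fields 0) by simp] at h1
  rw [h1]
  exact pvRender _ _
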